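-- pv_equiv track=rewrite | github.com/joonion/boj | Chap.55.누적합/2143.두배열의합/solve.py | solve
-- ===== SOURCE A (Python) =====
-- from bisect import bisect_left, bisect_right
--
-- def cumsum(A):
--     X = []
--     for i in range(1, len(A)):
--         A[i] += A[i - 1]
--     for i in range(len(A)):
--         for j in range(i + 1, len(A)):
--             X.append(A[j] - A[i])
--     return X
--
-- def solve(A, B, T):
--     X, Y = sorted(cumsum(A)), sorted(cumsum(B))
--     cnt = 0
--     for i in range(len(X)):
--         left = bisect_left(Y, T - X[i])
--         right = bisect_right(Y, T - X[i])
--         cnt += right - left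
--     return cnt
-- ===== SOURCE B (Python) =====
-- def _subsums(L):
--     # all sums of contiguous runs L[i+1..j] (0 <= i < j < len(L)),
--     # produced with a running sum instead of a prefix-sum table
--     sums = []
--     for i in range(len(L)):
--         s = 0
--         for j in range(i + 1, len(L)):
--             s += L[j]
--             sums.append(s)
--     return sums
--
-- def solve(A, B, T):
--     counts = {}
--     for y in _subsums(B):
--         counts[y] = counts.get(y, 0) + 1
--     cnt = 0
--     for x in _subsums(A):
--         cnt += counts.get(T - x, 0)
--     return cnt
-- ===== Notes on version B (the rewrite author's own statement) =====
-- stated objective: faster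
-- what changed: Replaces A's sort-both-lists + per-element bisect_left/bisect_right binary searches by a dict counting B's subarray sums (built with running sums instead of an in-place prefix-sum table) and an O(1) lookup of T-x for each of A's subarray sums; intended as faster (removes the log factor; a timing run measured ~2x up to n=1024, unconfirmed at larger sizes). B does not mutate its list arguments, while A overwrites them with prefix sums; the proved equivalence is about the return value.
import Mathlib
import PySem

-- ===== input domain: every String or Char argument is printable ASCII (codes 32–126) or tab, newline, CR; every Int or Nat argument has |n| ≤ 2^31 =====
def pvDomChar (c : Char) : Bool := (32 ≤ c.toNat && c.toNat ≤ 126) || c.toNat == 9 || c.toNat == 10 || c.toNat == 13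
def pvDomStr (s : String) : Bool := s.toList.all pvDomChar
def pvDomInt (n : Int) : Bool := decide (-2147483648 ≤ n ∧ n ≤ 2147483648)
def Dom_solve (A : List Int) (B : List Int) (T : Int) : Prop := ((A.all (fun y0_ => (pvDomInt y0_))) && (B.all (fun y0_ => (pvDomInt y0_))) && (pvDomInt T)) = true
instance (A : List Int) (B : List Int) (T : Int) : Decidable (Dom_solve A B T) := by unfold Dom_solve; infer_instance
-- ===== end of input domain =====

-- B replaces A's sort-both + per-element binary search by a hash-count of B's subarray
-- sums (built with running sums, no prefix table) and O(1) lookups; intended as faster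
-- (it drops the log factor: a timing run measured ~2x up to n=1024, unconfirmed beyond).
-- A mutates its list arguments in place (prefix sums); the equivalence proved here is
-- about the RETURN value only — B does not mutate its arguments.

-- ===== PORT A =====
-- first loop of Python cumsum: A[i] += A[i-1] for i in range(1, len(A))
def cumsumPfx (A : List Int) : List Int :=
  (PySem.List.pyRange 1 (A.length : Int) 1).foldl
    (fun P i => P.set i.toNat (PySem.List.pyGetD P i 0 + PySem.List.pyGetD P (i - 1) 0)) A

-- Python cumsum: the X-building double loop over the mutated prefix array
def cumsum (A : List Int) : List Int :=
  let P := cumsumPfx A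
  (PySem.List.pyRange 0 (P.length : Int) 1).foldl
    (fun X i =>
      (PySem.List.pyRange (i + 1) (P.length : Int) 1).foldl
        (fun X j => X ++ [PySem.List.pyGetD P j 0 - PySem.List.pyGetD P i 0]) X)
    []

def solve (A : List Int) (B : List Int) (T : Int) : Int :=
  let X := PySem.List.sorted (cumsum A) (fun x => x) false
  let Y := PySem.List.sorted (cumsum B) (fun x => x) false
  (PySem.List.pyRange 0 (X.length : Int) 1).foldl
    (fun cnt i =>
      let left := PySem.List.bisectLeft Y (T - PySem.List.pyGetD X i 0)
      let right := PySem.List.bisectRight Y (T - PySem.List.pyGetD X i 0)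
      cnt + ((right : Int) - (left : Int)))
    0

-- ===== PORT B =====
-- Source B _subsums: running-sum double loop, no prefix table
def subsums (L : List Int) : List Int :=
  (PySem.List.pyRange 0 (L.length : Int) 1).foldl
    (fun sums i =>
      ((PySem.List.pyRange (i + 1) (L.length : Int) 1).foldl
        (fun (p : List Int × Int) j =>
          (p.1 ++ [p.2 + PySem.List.pyGetD L j 0], p.2 + PySem.List.pyGetD L j 0))
        (sums, 0)).1)
    []

def solve_alt (A : List Int) (B : List Int) (T : Int) : Int :=
  let counts := (subsums B).foldl
    (fun (d : PySem.Dict Int Int) y => d.insert y (d.getD y 0 + 1)) PySem.Dict.empty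
  (subsums A).foldl (fun cnt x => cnt + counts.getD (T - x) 0) 0

-- ===== PRECONDITION & SPEC =====
def Spec_solve (A : List Int) (B : List Int) (T : Int) (out : Int) : Prop := out = solve_alt A B T
instance (A : List Int) (B : List Int) (T : Int) (out : Int) : Decidable (Spec_solve A B T out) := by unfold Spec_solve; infer_instance

-- ===== CLAIM (what is proved, stated in full; the proofs are below) =====
def Claim_equal_solve : Prop := ∀ (A : List Int) (B : List Int) (T : Int), Dom_solve A B T → Spec_solve A B T (solve A B T)

-- ===== LEMMAS AND PROOFS =====

-- sum of L[a..b-1] (indices as Python ints)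
def sumFrom (L : List Int) (a b : Int) : Int :=
  ((PySem.List.pyRange a b 1).map (fun k => PySem.List.pyGetD L k 0)).sum

-- the prefix array after processing indices 1..m-1 of the first cumsum loop
def pfxInv (L : List Int) (m : Nat) : List Int :=
  (List.range L.length).map (fun k => if k < m then sumFrom L 0 ((k : Int) + 1) else PySem.List.pyGetD L (k : Int) 0)

lemma pyRange_nil {a b : Int} (h : b ≤ a) : PySem.List.pyRange a b 1 = [] := by
  refine List.eq_nil_iff_forall_not_mem.mpr (fun x hx => ?_)
  rw [PySem.List.mem_pyRange_one] at hx
  omega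

lemma sumFrom_self (L : List Int) (a : Int) : sumFrom L a a = 0 := by
  simp [sumFrom, pyRange_nil le_rfl]

lemma pfxInv_length (L : List Int) (m : Nat) : (pfxInv L m).length = L.length := by
  rw [pfxInv, List.length_map, List.length_range]

lemma pyGetD_elem (L : List Int) (k : Nat) (hk : k < L.length) :
    PySem.List.pyGetD L (k : Int) 0 = L[k] := by
  rw [PySem.List.pyGetD_natCast, List.getD_eq_getElem _ _ hk]

lemma pfxInv_getElem (L : List Int) (m : Nat) (k : Nat) (hk : k < (pfxInv L m).length) :
    (pfxInv L m)[k] = if k < m then sumFrom L 0 ((k : Int) + 1) else PySem.List.pyGetD L (k : Int) 0 := by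
  simp only [pfxInv, List.getElem_map, List.getElem_range]

lemma sumFrom_cons (L : List Int) (a b : Int) (h : a < b) :
    sumFrom L a b = PySem.List.pyGetD L a 0 + sumFrom L (a + 1) b := by
  rw [sumFrom, sumFrom, PySem.List.pyRange_one_cons h]
  simp

lemma sumFrom_split (L : List Int) (a b c : Int) (h1 : a ≤ b) (h2 : b ≤ c) :
    sumFrom L a c = sumFrom L a b + sumFrom L b c := by
  rw [sumFrom, sumFrom, sumFrom, PySem.List.pyRange_one_append a b c h1 h2]
  simp

lemma pfxInv_getD (L : List Int) (m : Nat) (k : Nat) (hk : k < L.length) :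
    PySem.List.pyGetD (pfxInv L m) (k : Int) 0 =
      if k < m then sumFrom L 0 ((k : Int) + 1) else PySem.List.pyGetD L (k : Int) 0 := by
  rw [PySem.List.pyGetD_natCast, List.getD_eq_getElem _ _ (by rw [pfxInv_length]; exact hk)]
  rw [pfxInv_getElem]

lemma pfx_loop (L : List Int) : ∀ (m : Nat), 1 ≤ m → m ≤ L.length →
    (PySem.List.pyRange (m : Int) (L.length : Int) 1).foldl
      (fun P j => P.set j.toNat (PySem.List.pyGetD P j 0 + PySem.List.pyGetD P (j - 1) 0)) (pfxInv L m)
    = pfxInv L L.length := by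
  intro m h1 h2
  by_cases hlt : m < L.length
  · rw [PySem.List.pyRange_one_cons (by exact_mod_cast hlt), List.foldl_cons]
    have htn : ((m : Int)).toNat = m := by omega
    have hstep : (pfxInv L m).set ((m : Int)).toNat
        (PySem.List.pyGetD (pfxInv L m) (m : Int) 0 + PySem.List.pyGetD (pfxInv L m) ((m : Int) - 1) 0)
        = pfxInv L (m + 1) := by
      have hm1 : ((m : Int)) - 1 = ((m - 1 : Nat) : Int) := by omega
      have hg1 : PySem.List.pyGetD (pfxInv L m) (m : Int) 0 = PySem.List.pyGetD L (m : Int) 0 := by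
        rw [pfxInv_getD L m m hlt, if_neg (lt_irrefl m)]
      have hg2 : PySem.List.pyGetD (pfxInv L m) ((m : Int) - 1) 0 = sumFrom L 0 (m : Int) := by
        rw [hm1, pfxInv_getD L m (m - 1) (by omega), if_pos (by omega)]
        congr 1
        omega
      rw [hg1, hg2, htn]
      apply List.ext_getElem
      · rw [List.length_set, pfxInv_length, pfxInv_length]
      · intro k hk1 hk2
        have hkN : k < L.length := by rw [List.length_set, pfxInv_length] at hk1; exact hk1
        rw [List.getElem_set, pfxInv_getElem, pfxInv_getElem]
        by_cases hke : m = k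
        · rw [if_pos hke, if_pos (by omega)]
          subst hke
          rw [sumFrom_split L 0 (m : Int) ((m : Int) + 1) (by omega) (by omega)]
          rw [sumFrom_cons L (m : Int) ((m : Int) + 1) (by omega), sumFrom_self]
          ring
        · rw [if_neg hke]
          by_cases hkm : k < m
          · rw [if_pos hkm, if_pos (by omega)]
          · rw [if_neg hkm, if_neg (by omega)]
    rw [hstep]
    have hcast : ((m : Int)) + 1 = (((m + 1 : Nat)) : Int) := by omega
    rw [hcast]
    exact pfx_loop L (m + 1) (by omega) (by omega)
  · have : m = L.length := by omega
    subst this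
    rw [pyRange_nil le_rfl]
    simp
termination_by m => L.length - m
decreasing_by omega

lemma cumsumPfx_eq (L : List Int) : cumsumPfx L = pfxInv L L.length := by
  rcases L with _ | ⟨a, t⟩
  · rw [cumsumPfx, pfxInv]
    rw [pyRange_nil (by norm_num)]
    simp
  · set L := a :: t with hL
    have hn : 1 ≤ L.length := by rw [hL]; simp
    have hbase : L = pfxInv L 1 := by
      apply List.ext_getElem
      · rw [pfxInv_length]
      · intro k hk1 hk2
        rw [pfxInv_getElem]
        by_cases hk0 : k < 1
        · have hk0' : k = 0 := by omega
          subst hk0'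
          rw [if_pos (by omega)]
          have : ((0 : Nat) : Int) + 1 = 1 := by norm_num
          rw [this, sumFrom_cons L 0 1 (by norm_num)]
          rw [show (0 : Int) + 1 = (1 : Int) from by norm_num, sumFrom_self]
          have h := pyGetD_elem L 0 hk1
          simp only [Nat.cast_zero] at h
          rw [h, add_zero]
        · rw [if_neg hk0, pyGetD_elem L k hk1]
    have hloop := pfx_loop L 1 le_rfl hn
    simp only [Nat.cast_one] at hloop
    rw [← hbase] at hloop
    rw [cumsumPfx]
    exact hloop

lemma inner_fold (L : List Int) (b : Int) : ∀ (a : Int) (acc : List Int) (s : Int), 0 ≤ a →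
    ((PySem.List.pyRange a b 1).foldl
      (fun (p : List Int × Int) j =>
        (p.1 ++ [p.2 + PySem.List.pyGetD L j 0], p.2 + PySem.List.pyGetD L j 0)) (acc, s)).1
    = acc ++ (PySem.List.pyRange a b 1).map (fun j => s + sumFrom L a (j + 1)) := by
  intro a acc s ha
  by_cases hab : a < b
  · rw [PySem.List.pyRange_one_cons hab, List.foldl_cons, List.map_cons]
    have IH := inner_fold L b (a + 1) (acc ++ [s + PySem.List.pyGetD L a 0])
      (s + PySem.List.pyGetD L a 0) (by omega)
    simp only at IH
    rw [IH]
    have h1 : s + sumFrom L a (a + 1) = s + PySem.List.pyGetD L a 0 := by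
      rw [sumFrom_cons L a (a + 1) (by omega), sumFrom_self]; ring
    have h2 : (PySem.List.pyRange (a + 1) b 1).map
        (fun j => s + PySem.List.pyGetD L a 0 + sumFrom L (a + 1) (j + 1))
        = (PySem.List.pyRange (a + 1) b 1).map (fun j => s + sumFrom L a (j + 1)) := by
      apply List.map_congr_left
      intro j hj
      rw [PySem.List.mem_pyRange_one] at hj
      rw [sumFrom_cons L a (j + 1) (by omega)]
      ring
    rw [h2, h1]
    simp
  · rw [pyRange_nil (by omega)]
    simp
termination_by a => (b - a).toNat
decreasing_by omega

lemma cumsum_eq_subsums (L : List Int) : cumsum L = subsums L := by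
  rw [cumsum, subsums]
  simp only [cumsumPfx_eq, pfxInv_length]
  apply PySem.List.foldl_congr_mem
  intro acc i hi
  rw [PySem.List.mem_pyRange_one] at hi
  rw [PySem.List.foldl_append_singleton_eq_map
    (fun j => PySem.List.pyGetD (pfxInv L L.length) j 0
              - PySem.List.pyGetD (pfxInv L L.length) i 0)]
  rw [inner_fold L (L.length : Int) (i + 1) acc 0 (by omega)]
  congr 1
  apply List.map_congr_left
  intro j hj
  rw [PySem.List.mem_pyRange_one] at hj
  have hjI : ((j.toNat : Nat) : Int) = j := Int.toNat_of_nonneg (by omega)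
  have hiI : ((i.toNat : Nat) : Int) = i := Int.toNat_of_nonneg (by omega)
  have hgj : PySem.List.pyGetD (pfxInv L L.length) j 0 = sumFrom L 0 (j + 1) := by
    rw [← hjI, pfxInv_getD L L.length j.toNat (by omega)]
    rw [if_pos (by omega), hjI]
  have hgi : PySem.List.pyGetD (pfxInv L L.length) i 0 = sumFrom L 0 (i + 1) := by
    rw [← hiI, pfxInv_getD L L.length i.toNat (by omega)]
    rw [if_pos (by omega), hiI]
  rw [hgj, hgi]
  rw [sumFrom_split L 0 (i + 1) (j + 1) (by omega) (by omega)]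
  ring

lemma countP_split (xs : List Int) (p : Int → Bool) (b : Nat) (hb : b ≤ xs.length)
    (h1 : ∀ (j : Nat) (hj : j < xs.length), j < b → p xs[j])
    (h2 : ∀ (j : Nat) (hj : j < xs.length), b ≤ j → ¬ p xs[j]) :
    xs.countP p = b := by
  conv_lhs => rw [← List.take_append_drop b xs]
  rw [List.countP_append]
  have ht : (xs.take b).countP p = (xs.take b).length := by
    rw [List.countP_eq_length]
    intro y hy
    rcases List.mem_iff_getElem.mp hy with ⟨i, hi, rfl⟩
    rw [List.getElem_take]
    exact h1 i (by simp at hi; omega) (by simp at hi; omega)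
  have hd : (xs.drop b).countP p = 0 := by
    rw [List.countP_eq_zero]
    intro y hy
    rcases List.mem_iff_getElem.mp hy with ⟨i, hi, rfl⟩
    rw [List.getElem_drop]
    exact h2 (b + i) (by simp at hi; omega) (by omega)
  rw [ht, hd, List.length_take]
  omega

lemma countP_le_eq (xs : List Int) (x : Int) :
    xs.countP (fun y => decide (y ≤ x)) = xs.countP (fun y => decide (y < x)) + xs.count x := by
  induction xs with
  | nil => simp
  | cons a t ih =>
    simp only [List.countP_cons, List.count_cons, ih]
    by_cases h1 : a = x
    · subst h1
      simp
      omega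
    · have hne : ¬ x = a := fun hc => h1 hc.symm
      by_cases h2 : a < x
      · simp [h2, le_of_lt h2, h1]
        try omega
      · have h3 : ¬ a ≤ x := fun hc => h1 (le_antisymm hc (not_lt.mp h2))
        simp [h2, h3, h1]

lemma bisect_sub_eq_count (Y : List Int) (x : Int) (h : Y.Pairwise (· ≤ ·)) :
    (PySem.List.bisectRight Y x : Int) - (PySem.List.bisectLeft Y x : Int) = (Y.count x : Int) := by
  obtain ⟨hL1, hL2, hL3⟩ := PySem.List.bisectLeft_spec Y x h
  obtain ⟨hR1, hR2, hR3⟩ := PySem.List.bisectRight_spec Y x h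
  have hbl : Y.countP (fun y => decide (y < x)) = PySem.List.bisectLeft Y x := by
    apply countP_split Y _ _ hL1
    · intro j hj hjb
      simpa using hL2 j hj hjb
    · intro j hj hjb
      simpa using not_lt.mpr (hL3 j hj hjb)
  have hbr : Y.countP (fun y => decide (y ≤ x)) = PySem.List.bisectRight Y x := by
    apply countP_split Y _ _ hR1
    · intro j hj hjb
      simpa using hR2 j hj hjb
    · intro j hj hjb
      simpa using not_le.mpr (hR3 j hj hjb)
  have := countP_le_eq Y x
  omega

-- ===== VERDICT (by name: the statement is the Claim_ definition above) =====
lemma dict_count (ys : List Int) (v : Int) :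
    (ys.foldl (fun (d : PySem.Dict Int Int) y => d.insert y (d.getD y 0 + 1))
      PySem.Dict.empty).getD v 0 = (ys.count v : Int) := by
  rw [PySem.Dict.getD_foldl_insert_add_one]
  simp [pysem]

theorem solve_spec : Claim_equal_solve := by
  intro A B T _
  unfold Spec_solve solve solve_alt
  simp only []
  have hlen1 : ((PySem.List.sorted (cumsum A) (fun x => x) false).length : Int)
      = PySem.List.len (PySem.List.sorted (cumsum A) (fun x => x) false) := rfl
  rw [hlen1]
  rw [PySem.List.foldl_pyRange_pyGetD
      (PySem.List.sorted (cumsum A) (fun x => x) false) 0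
      (fun cnt v => cnt + ((PySem.List.bisectRight (PySem.List.sorted (cumsum B) (fun x => x) false) (T - v) : Int)
        - (PySem.List.bisectLeft (PySem.List.sorted (cumsum B) (fun x => x) false) (T - v) : Int))) 0 le_rfl]
  simp only [Int.toNat_zero, List.drop_zero]
  rw [PySem.List.foldl_add _ (fun v =>
      ((PySem.List.bisectRight (PySem.List.sorted (cumsum B) (fun x => x) false) (T - v) : Int)
        - (PySem.List.bisectLeft (PySem.List.sorted (cumsum B) (fun x => x) false) (T - v) : Int))) 0]
  rw [PySem.List.foldl_add _ (fun x =>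
      ((subsums B).foldl (fun (d : PySem.Dict Int Int) y => d.insert y (d.getD y 0 + 1))
        PySem.Dict.empty).getD (T - x) 0) 0]
  congr 1
  have hpair : (PySem.List.sorted (cumsum B) (fun x => x) false).Pairwise (· ≤ ·) :=
    PySem.List.sorted_pairwise (cumsum B) (fun x => x)
  have hmap1 : (PySem.List.sorted (cumsum A) (fun x => x) false).map (fun v =>
      ((PySem.List.bisectRight (PySem.List.sorted (cumsum B) (fun x => x) false) (T - v) : Int)
        - (PySem.List.bisectLeft (PySem.List.sorted (cumsum B) (fun x => x) false) (T - v) : Int)))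
      = (PySem.List.sorted (cumsum A) (fun x => x) false).map (fun v => ((subsums B).count (T - v) : Int)) := by
    apply List.map_congr_left
    intro v _
    rw [bisect_sub_eq_count _ _ hpair]
    rw [(PySem.List.sorted_perm (cumsum B) (fun x => x) false).count_eq]
    rw [cumsum_eq_subsums]
  rw [hmap1]
  have hperm : ((PySem.List.sorted (cumsum A) (fun x => x) false).map
      (fun v => ((subsums B).count (T - v) : Int))).Perm
      ((cumsum A).map (fun v => ((subsums B).count (T - v) : Int))) :=
    (PySem.List.sorted_perm (cumsum A) (fun x => x) false).map _
  rw [hperm.sum_eq]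
  rw [cumsum_eq_subsums]
  apply congrArg
  apply List.map_congr_left
  intro v _
  rw [dict_count]
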